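-- pv_equiv track=rewrite | github.com/lazvdk/FormsClassification | matrix_homomorphism_generator.py | homogenous_polynomial
-- ===== SOURCE A (Python) =====
-- from math import comb, prod
-- from itertools import combinations_with_replacement as multisets
--
-- def homogenous_polynomial(n, d):
--     t= comb((d+n-1), d)
--     variables = ["x" + str(_) for _ in range(1, n+1)]
--     coefficients = ["c" + str(_) for _ in range(1, t+1)]
--
--     monomials_without_coeffs = map("*".join, (multisets(variables, r=d)))
--
--     full_monomials = map("*".join, (zip(coefficients, monomials_without_coeffs)))
--
--     polynomial = " + ".join(full_monomials)
--
--     return polynomial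
-- ===== SOURCE B (Python) =====
-- def homogenous_polynomial(n, d):
--     # Depth-first generation of the nondecreasing-index monomials with an
--     # explicit stack; factor chains are shared cons cells (var, parent).
--     terms = []
--     stack = [(1, d, None)]
--     while stack:
--         start, rem, chain = stack.pop()
--         if rem == 0:
--             factors = []
--             while chain is not None:
--                 factors.append(chain[0])
--                 chain = chain[1]
--             factors.reverse()
--             terms.append("c%d*%s" % (len(terms) + 1, "*".join(factors)))
--         else:
--             for i in range(n, start - 1, -1):
--                 stack.append((i, rem - 1, ("x%d" % i, chain)))
--     return " + ".join(terms)
-- ===== Notes on version B (the rewrite author's own statement) =====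
-- stated objective: alternative
-- what changed: Replaces the itertools.combinations_with_replacement enumeration plus comb-counted coefficient list and zip with a direct recursive generator over (start index, remaining degree) that emits each full term 'ck*monomial' with an inline counter as it goes.
import Mathlib
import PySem

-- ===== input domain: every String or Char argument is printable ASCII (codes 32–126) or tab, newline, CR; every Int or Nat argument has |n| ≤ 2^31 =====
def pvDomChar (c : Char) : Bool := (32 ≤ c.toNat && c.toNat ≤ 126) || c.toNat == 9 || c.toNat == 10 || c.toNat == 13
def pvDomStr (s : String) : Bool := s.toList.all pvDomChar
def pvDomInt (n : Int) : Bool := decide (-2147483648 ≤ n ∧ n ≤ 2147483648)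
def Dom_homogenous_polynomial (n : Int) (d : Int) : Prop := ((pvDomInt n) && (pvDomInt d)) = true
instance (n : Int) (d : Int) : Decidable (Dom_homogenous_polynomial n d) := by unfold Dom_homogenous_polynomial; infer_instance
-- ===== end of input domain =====

-- B replaces the itertools.combinations_with_replacement enumeration + comb-counted
-- coefficient list + zip of A with a direct recursive generator over
-- (start index, remaining degree) emitting numbered terms as it goes (objective: alternative).

-- ===== PORT A =====
-- itertools.combinations_with_replacement(xs, r) in its exact emission order
def pvCwr {α : Type} : List α → Nat → List (List α)
  | _, 0 => [[]]
  | [], _ + 1 => []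
  | x :: rest, r + 1 => (pvCwr (x :: rest) r).map (fun m => x :: m) ++ pvCwr rest (r + 1)
  termination_by xs r => (r, xs.length)

def homogenous_polynomial (n : Int) (d : Int) : String :=
  -- t = comb(d+n-1, d); Pre_ restricts to d ≥ 0 ∧ d+n-1 ≥ 0 (math.comb raises otherwise)
  let t : Int := ((d + n - 1).toNat.choose d.toNat : Nat)
  let variables_ := (PySem.List.pyRange 1 (n + 1) 1).map (fun i => "x" ++ PySem.Int.toStr i)
  let coefficients := (PySem.List.pyRange 1 (t + 1) 1).map (fun i => "c" ++ PySem.Int.toStr i)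
  let monomials_without_coeffs := (pvCwr variables_ d.toNat).map (fun m => String.intercalate "*" m)
  let full_monomials := (coefficients.zip monomials_without_coeffs).map (fun p => p.1 ++ "*" ++ p.2)
  String.intercalate " + " full_monomials

-- ===== PORT B =====
-- node weight of the DFS tree under an entry (start, rem): used as the loop measure
def pvNodes (n : Int) : Nat → Int → Nat
  | 0, _ => 1
  | r + 1, s => 1 + ((PySem.List.pyRange s (n + 1) 1).map (pvNodes n r)).sum

-- Source B's while-loop over the explicit stack; the stack is kept top-first here, so
-- Python's descending append loop 'for i in range(n, start-1, -1): stack.append(…)'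
-- becomes prepending the ascending range; cons chains are Lean lists (head = last factor).
-- The fuel argument is only a totality guard: it is the exact number of loop
-- iterations (pvNodes of the initial entry), so it never runs out.
def pvAux (n : Int) : Nat → List (Int × Nat × List String) → List String → List String
  | _, [], terms => terms
  | 0, _ :: _, terms => terms
  | fuel + 1, (_, 0, chain) :: rest, terms =>
      pvAux n fuel rest
        (terms ++ ["c" ++ PySem.Int.toStr ((terms.length : Int) + 1) ++ "*"
          ++ String.intercalate "*" chain.reverse])
  | fuel + 1, (start, r + 1, chain) :: rest, terms =>
      pvAux n fuel
        ((PySem.List.pyRange start (n + 1) 1).map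
          (fun i => (i, r, ("x" ++ PySem.Int.toStr i) :: chain)) ++ rest) terms

def homogenous_polynomial_alt (n : Int) (d : Int) : String :=
  String.intercalate " + " (pvAux n (pvNodes n d.toNat 1) [(1, d.toNat, [])] [])

-- ===== PRECONDITION & SPEC =====
-- Pre_ excludes exactly the inputs where math.comb raises ValueError (a negative argument).
def Pre_homogenous_polynomial (n : Int) (d : Int) : Prop := 0 ≤ d ∧ 0 ≤ d + n - 1
instance (n : Int) (d : Int) : Decidable (Pre_homogenous_polynomial n d) := by
  unfold Pre_homogenous_polynomial; infer_instance

def pvWitness_homogenous_polynomial : Int × Int := (3, 2)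

def Spec_homogenous_polynomial (n : Int) (d : Int) (out : String) : Prop := out = homogenous_polynomial_alt n d
instance (n : Int) (d : Int) (out : String) : Decidable (Spec_homogenous_polynomial n d out) := by unfold Spec_homogenous_polynomial; infer_instance

-- ===== CLAIM (what is proved, stated in full; the proofs are below) =====
def Claim_equal_homogenous_polynomial : Prop := ∀ (n : Int) (d : Int), Dom_homogenous_polynomial n d → Pre_homogenous_polynomial n d → Spec_homogenous_polynomial n d (homogenous_polynomial n d)


-- ===== LEMMAS AND PROOFS =====

-- the variable strings of indices start..n, and a numbered term builder
def pvVlist (n start : Int) : List String :=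
  (PySem.List.pyRange start (n + 1) 1).map (fun i => "x" ++ PySem.Int.toStr i)

def pvMk (k : Int) (m : List String) : String :=
  "c" ++ PySem.Int.toStr k ++ "*" ++ String.intercalate "*" m

-- number a list of factor-lists with consecutive coefficients starting at k
def pvNum (factors : List String) : Int → List (List String) → List String
  | _, [] => []
  | k, m :: ms => pvMk k (factors ++ m) :: pvNum factors (k + 1) ms

lemma pvRange_nil {a b : Int} (h : b ≤ a) : PySem.List.pyRange a b 1 = [] := by
  apply List.eq_nil_of_length_eq_zero
  simp [pysem]
  omega

lemma pvNum_append (f : List String) (k : Int) (a b : List (List String)) :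
    pvNum f k (a ++ b) = pvNum f k a ++ pvNum f (k + a.length) b := by
  induction a generalizing k with
  | nil => simp [pvNum]
  | cons m ms ih =>
      simp only [List.cons_append, pvNum, ih, List.length_cons]
      congr 3
      push_cast
      omega

lemma pvNum_map_cons (f : List String) (v : String) (k : Int) (ms : List (List String)) :
    pvNum f k (ms.map (fun m => v :: m)) = pvNum (f ++ [v]) k ms := by
  induction ms generalizing k with
  | nil => rfl
  | cons m ms ih => simp [pvNum, ih, pvMk]

lemma pvCwr_length {α : Type} (r : Nat) (xs : List α) :
    (pvCwr xs r).length = (xs.length + r - 1).choose r := by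
  induction r generalizing xs with
  | zero => simp [pvCwr]
  | succ r ih =>
      induction xs with
      | nil =>
          simp [pvCwr]
      | cons x rest ihx =>
          rw [pvCwr]
          simp only [List.length_append, List.length_map, ih, ihx, List.length_cons]
          have h1 : rest.length + 1 + r - 1 = rest.length + r := by omega
          have h2 : rest.length + (r + 1) - 1 = rest.length + r := by omega
          have h3 : rest.length + 1 + (r + 1) - 1 = rest.length + r + 1 := by omega
          rw [h1, h2, h3, Nat.choose_succ_succ]

-- the terms an entry stack still has to produce, with coefficients numbered from k
def pvFlat (n : Int) : List (Int × Nat × List String) → Int → List String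
  | [], _ => []
  | (s, r, ch) :: rest, k =>
      pvNum ch.reverse k (pvCwr (pvVlist n s) r)
        ++ pvFlat n rest (k + (pvCwr (pvVlist n s) r).length)

lemma pvFlat_expand (n : Int) (r : Nat) :
    ∀ (fuel : Nat) (s : Int), (n + 1 - s).toNat ≤ fuel →
    ∀ (ch : List String) (rest : List (Int × Nat × List String)) (k : Int),
      pvFlat n ((PySem.List.pyRange s (n + 1) 1).map
          (fun i => (i, r, ("x" ++ PySem.Int.toStr i) :: ch)) ++ rest) k
        = pvNum ch.reverse k (pvCwr (pvVlist n s) (r + 1))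
            ++ pvFlat n rest (k + (pvCwr (pvVlist n s) (r + 1)).length) := by
  intro fuel
  induction fuel with
  | zero =>
      intro s hs ch rest k
      have hrange : PySem.List.pyRange s (n + 1) 1 = [] := pvRange_nil (by omega)
      have hv : pvVlist n s = [] := by unfold pvVlist; rw [hrange]; rfl
      rw [hrange, hv, pvCwr]
      simp [pvNum]
  | succ fuel ihf =>
      intro s hs ch rest k
      by_cases hlt : s < n + 1
      · have hrange := PySem.List.pyRange_one_cons hlt
        have hv : pvVlist n s = ("x" ++ PySem.Int.toStr s) :: pvVlist n (s + 1) := by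
          unfold pvVlist; rw [hrange]; simp
        rw [hrange]
        simp only [List.map_cons, List.cons_append, pvFlat]
        rw [ihf (s + 1) (by omega), hv, pvCwr]
        rw [pvNum_append, pvNum_map_cons, List.reverse_cons]
        simp only [List.append_assoc, List.length_append, List.length_map]
        congr 2
        all_goals congr 1; push_cast; ring
      · have hrange : PySem.List.pyRange s (n + 1) 1 = [] := pvRange_nil (by omega)
        have hv : pvVlist n s = [] := by unfold pvVlist; rw [hrange]; rfl
        rw [hrange, hv, pvCwr]
        simp [pvNum]

lemma pvNodes_pos (n : Int) (r : Nat) (s : Int) : 1 ≤ pvNodes n r s := by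
  cases r <;> simp [pvNodes]

lemma pvAux_spec (n : Int) :
    ∀ (fuel : Nat) (stack : List (Int × Nat × List String)) (terms : List String),
      (stack.map (fun e => pvNodes n e.2.1 e.1)).sum ≤ fuel →
      pvAux n fuel stack terms = terms ++ pvFlat n stack ((terms.length : Int) + 1) := by
  intro fuel
  induction fuel with
  | zero =>
      intro stack terms hm
      match stack with
      | [] => simp [pvAux, pvFlat]
      | (s, r, ch) :: rest =>
          exfalso
          have := pvNodes_pos n r s
          simp only [List.map_cons, List.sum_cons] at hm
          omega
  | succ fuel ih =>
      intro stack terms hm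
      match stack with
      | [] => simp [pvAux, pvFlat]
      | (s, 0, ch) :: rest =>
          simp only [List.map_cons, List.sum_cons, pvNodes] at hm
          rw [pvAux, ih rest _ (by omega)]
          simp only [pvFlat, pvCwr, pvNum, pvMk, List.append_nil, List.length_cons,
            List.length_append, List.length_nil]
          rw [List.append_assoc]
          push_cast
          ring_nf
      | (s, r + 1, ch) :: rest =>
          simp only [List.map_cons, List.sum_cons] at hm
          have hsum : (((PySem.List.pyRange s (n + 1) 1).map
                (fun i => (i, r, ("x" ++ PySem.Int.toStr i) :: ch))).map
                  (fun e => pvNodes n e.2.1 e.1)).sum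
              = ((PySem.List.pyRange s (n + 1) 1).map (pvNodes n r)).sum := by
            simp [List.map_map, Function.comp_def]
          have hn : pvNodes n (r + 1) s
              = 1 + ((PySem.List.pyRange s (n + 1) 1).map (pvNodes n r)).sum := rfl
          rw [pvAux, ih _ _ (by rw [List.map_append, List.sum_append, hsum]; omega)]
          rw [pvFlat_expand n r (n + 1 - s).toNat s (le_refl _)]
          rfl

-- A's zip of range-generated coefficients with joined monomials is pvNum [] k,
-- provided the coefficient range is long enough
lemma pvZipA (ms : List (List String)) :
    ∀ (k e : Int), (ms.length : Int) ≤ e - k →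
      (((PySem.List.pyRange k e 1).map (fun i => "c" ++ PySem.Int.toStr i)).zip
          (ms.map (fun m => String.intercalate "*" m))).map (fun p => p.1 ++ "*" ++ p.2)
        = pvNum [] k ms := by
  induction ms with
  | nil => intro k e _; simp [pvNum]
  | cons m ms ih =>
      intro k e h
      have hlt : k < e := by
        have := h; simp only [List.length_cons] at this; push_cast at this; omega
      rw [PySem.List.pyRange_one_cons hlt]
      simp only [List.map_cons, List.zip_cons_cons]
      rw [ih (k + 1) e (by simp only [List.length_cons] at h; push_cast at h; omega)]
      simp [pvNum, pvMk, String.append_assoc]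

theorem pv_main (n d : Int) (hd : 0 ≤ d) (hnd : 0 ≤ d + n - 1) :
    homogenous_polynomial n d = homogenous_polynomial_alt n d := by
  simp only [homogenous_polynomial, homogenous_polynomial_alt]
  rw [pvAux_spec n _ _ _ (by simp)]
  simp only [List.nil_append, List.length_nil, Nat.cast_zero, zero_add, pvFlat,
    List.reverse_nil, List.append_nil]
  have hXlen : ((PySem.List.pyRange 1 (n + 1) 1).map
      (fun i => "x" ++ PySem.Int.toStr i)).length = (n + 1 - 1).toNat := by
    simp [pysem]
  have hlen : (((pvCwr ((PySem.List.pyRange 1 (n + 1) 1).map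
        (fun i => "x" ++ PySem.Int.toStr i)) d.toNat).length : Int))
      ≤ (((d + n - 1).toNat.choose d.toNat : Nat) : Int) := by
    rw [pvCwr_length, hXlen]
    rcases le_or_gt 1 n with hn | hn
    · apply le_of_eq
      norm_cast
      congr 1
      omega
    · have hX0 : (n + 1 - 1).toNat = 0 := by omega
      have hz : (0 + d.toNat - 1).choose d.toNat = 0 :=
        Nat.choose_eq_zero_of_lt (by omega)
      rw [hX0, hz]
      positivity
  congr 1
  show _ = pvNum [] (0 + 1) (pvCwr (pvVlist n 1) d.toNat)
  rw [zero_add]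
  exact pvZipA _ 1 ((((d + n - 1).toNat.choose d.toNat : Nat) : Int) + 1)
    (by rw [add_sub_cancel_right]; exact hlen)

-- ===== VERDICT (by name: the statement is the Claim_ definition above) =====
theorem homogenous_polynomial_spec : Claim_equal_homogenous_polynomial := by
  intro n d _ hpre
  unfold Spec_homogenous_polynomial
  exact pv_main n d hpre.1 hpre.2
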